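-- pv_equiv track=rewrite | github.com/marcopoli/emofinder | data_processing/text_transform_avg.py | numSpecial_meta
-- ===== SOURCE A (Python) =====
-- def numSpecial_meta(tw):
--     countMention = 0
--     countReserved = 0
--     countUrls = 0
--     countNumbers= 0
--     countPercents = 0
--     countEmails = 0
--     countMoney = 0
--     countPhone = 0
--     countTime = 0
--     countDate = 0
--
--     for c in tw:
--         if c == '<mention>':
--             countMention+=1
--         if c == '<reserved>':
--             countReserved+=1
--         if c == '<url>' or c == '<url>':
--             countUrls+=1
--         if c == '<number>':
--             countNumbers+=1
--         if c == '<percent>':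
--             countPercents+=1
--         if c == '<email>':
--             countEmails+=1
--         if c == '<money>':
--             countMoney+=1
--         if c == '<phone>':
--             countPhone+=1
--         if c == '<time>':
--             countTime+=1
--         if c == '<date>':
--             countDate=1
--
--     return countMention,countReserved,countUrls,countNumbers,countEmails,countMoney,countPhone,countTime,countDate
-- ===== SOURCE B (Python) =====
-- def numSpecial_meta(tw):
--     c = tw.count
--     return (c('<mention>'), c('<reserved>'), c('<url>'), c('<number>'),
--             c('<email>'), c('<money>'), c('<phone>'), c('<time>'),
--             1 if '<date>' in tw else 0)
-- ===== Notes on version B (the rewrite author's own statement) =====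
-- stated objective: idiomatic
-- what changed: Replaces the 10-branch counting loop (whose percent count is computed and discarded and whose date flag is a set-once 0/1) by direct per-token list.count calls and a membership test for the date flag.
import Mathlib
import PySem

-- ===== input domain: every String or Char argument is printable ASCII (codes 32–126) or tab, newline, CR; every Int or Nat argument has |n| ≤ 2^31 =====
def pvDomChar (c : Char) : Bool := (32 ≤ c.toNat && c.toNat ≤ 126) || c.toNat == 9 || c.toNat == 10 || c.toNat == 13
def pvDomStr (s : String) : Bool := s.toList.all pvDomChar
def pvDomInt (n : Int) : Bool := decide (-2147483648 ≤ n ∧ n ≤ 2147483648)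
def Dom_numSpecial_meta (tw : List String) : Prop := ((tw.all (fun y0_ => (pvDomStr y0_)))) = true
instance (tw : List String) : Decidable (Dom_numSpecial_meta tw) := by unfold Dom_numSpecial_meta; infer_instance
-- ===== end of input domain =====

-- B replaces A's single 10-branch counting loop by direct per-token count calls
-- plus a membership test for the set-once date flag (objective: idiomatic).

-- ===== PORT A =====
-- Literal port of A: one loop over `tw` updating ten counters (percents is
-- computed but dropped from the return; the date counter is SET to 1, not incremented).
def pvStepA (st : Int × Int × Int × Int × Int × Int × Int × Int × Int × Int) (c : String) :
    Int × Int × Int × Int × Int × Int × Int × Int × Int × Int :=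
  let (m, r, u, n, p, e, mo, ph, t, d) := st
  let m := if c == "<mention>" then m + 1 else m
  let r := if c == "<reserved>" then r + 1 else r
  let u := if c == "<url>" || c == "<url>" then u + 1 else u
  let n := if c == "<number>" then n + 1 else n
  let p := if c == "<percent>" then p + 1 else p
  let e := if c == "<email>" then e + 1 else e
  let mo := if c == "<money>" then mo + 1 else mo
  let ph := if c == "<phone>" then ph + 1 else ph
  let t := if c == "<time>" then t + 1 else t
  let d := if c == "<date>" then (1 : Int) else d
  (m, r, u, n, p, e, mo, ph, t, d)

def numSpecial_meta (tw : List String) : Int × Int × Int × Int × Int × Int × Int × Int × Int :=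
  let s := tw.foldl pvStepA (0, 0, 0, 0, 0, 0, 0, 0, 0, 0)
  (s.1, s.2.1, s.2.2.1, s.2.2.2.1, s.2.2.2.2.2.1, s.2.2.2.2.2.2.1,
   s.2.2.2.2.2.2.2.1, s.2.2.2.2.2.2.2.2.1, s.2.2.2.2.2.2.2.2.2)

-- ===== PORT B =====
-- Port of B: per-token `tw.count` calls plus a membership test for the date flag.
def numSpecial_meta_alt (tw : List String) : Int × Int × Int × Int × Int × Int × Int × Int × Int :=
  ((tw.count "<mention>" : Int), (tw.count "<reserved>" : Int), (tw.count "<url>" : Int),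
   (tw.count "<number>" : Int), (tw.count "<email>" : Int), (tw.count "<money>" : Int),
   (tw.count "<phone>" : Int), (tw.count "<time>" : Int),
   if "<date>" ∈ tw then (1 : Int) else 0)

-- ===== PRECONDITION & SPEC =====
def Spec_numSpecial_meta (tw : List String) (out : Int × Int × Int × Int × Int × Int × Int × Int × Int) : Prop := out = numSpecial_meta_alt tw
instance (tw : List String) (out : Int × Int × Int × Int × Int × Int × Int × Int × Int) : Decidable (Spec_numSpecial_meta tw out) := by
  unfold Spec_numSpecial_meta
  exact (letI i2 : DecidableEq (Int × Int) := instDecidableEqProd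
         letI i3 : DecidableEq (Int × Int × Int) := instDecidableEqProd
         letI i4 : DecidableEq (Int × Int × Int × Int) := instDecidableEqProd
         letI i5 : DecidableEq (Int × Int × Int × Int × Int) := instDecidableEqProd
         letI i6 : DecidableEq (Int × Int × Int × Int × Int × Int) := instDecidableEqProd
         letI i7 : DecidableEq (Int × Int × Int × Int × Int × Int × Int) := instDecidableEqProd
         letI i8 : DecidableEq (Int × Int × Int × Int × Int × Int × Int × Int) := instDecidableEqProd
         letI i9 : DecidableEq (Int × Int × Int × Int × Int × Int × Int × Int × Int) := instDecidableEqProd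
         i9 out (numSpecial_meta_alt tw))

-- ===== CLAIM (what is proved, stated in full; the proofs are below) =====
def Claim_equal_numSpecial_meta : Prop := ∀ (tw : List String), Dom_numSpecial_meta tw → Spec_numSpecial_meta tw (numSpecial_meta tw)

-- ===== LEMMAS AND PROOFS =====
lemma pvLoopA (tw : List String) (m r u n p e mo ph t d : Int) :
    tw.foldl pvStepA (m, r, u, n, p, e, mo, ph, t, d) =
      (m + tw.count "<mention>", r + tw.count "<reserved>", u + tw.count "<url>",
       n + tw.count "<number>", p + tw.count "<percent>", e + tw.count "<email>",
       mo + tw.count "<money>", ph + tw.count "<phone>", t + tw.count "<time>",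
       if "<date>" ∈ tw then (1 : Int) else d) := by
  induction tw generalizing m r u n p e mo ph t d with
  | nil => simp
  | cons hd tl ih =>
      simp only [List.foldl_cons, pvStepA, ih, List.count_cons, List.mem_cons, Prod.mk.injEq]
      refine ⟨?_, ?_, ?_, ?_, ?_, ?_, ?_, ?_, ?_, ?_⟩ <;>
        · push_cast
          split_ifs <;> simp_all <;> omega

-- ===== VERDICT (by name: the statement is the Claim_ definition above) =====
theorem numSpecial_meta_spec : Claim_equal_numSpecial_meta := by
  intro tw _
  unfold Spec_numSpecial_meta numSpecial_meta numSpecial_meta_alt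
  simp [pvLoopA]
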